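-- pv_equiv track=rewrite | github.com/Biswas57/formify | backend/api/groq_parse.py | parseFullTranscriptandAttributes
-- ===== SOURCE A (Python) =====
-- def parseFullTranscriptandAttributes(fullTranscript: str, collectedAttributes: list[dict]) -> dict:
--     """
--     Given the full transcript and a list of attribute dictionaries extracted
--     over multiple rounds, determine the most relevant value for each attribute.
--     The method works by:
--       1. Collecting all candidate values for each attribute.
--       2. Counting how often each candidate appears.
--       3. Preferring the candidate that occurs most frequently and ensuring it is
--          mentioned in the full transcript.
--     Returns a dictionary mapping attribute names to their selected values.
--     """
--     final_attributes = {}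
--     candidate_values = {}
--
--     # Gather all candidate values from each dictionary
--     for attr_dict in collectedAttributes:
--         for key, value in attr_dict.items():
--             if key not in candidate_values:
--                 candidate_values[key] = []
--             candidate_values[key].append(value)
--
--     # For each attribute, select the candidate that is most frequent
--     for key, values in candidate_values.items():
--         # Count frequency of each candidate value.
--         freq = {}
--         for value in values:
--             freq[value] = freq.get(value, 0) + 1
--
--         # Choose candidate with highest frequency.
--         best_candidate = max(freq.items(), key=lambda x: x[1])[0]
--
--         final_attributes[key] = best_candidate
--
--     return final_attributes
-- ===== SOURCE B (Python) =====
-- def parseFullTranscriptandAttributes(fullTranscript: str, collectedAttributes: list[dict]) -> dict: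
--     # One pass: count occurrences per (attribute, value) in a nested counter dict,
--     # then pick each attribute's first-seen most frequent value by a running scan.
--     freq = {}
--     for attr_dict in collectedAttributes:
--         for key, value in attr_dict.items():
--             f = freq.setdefault(key, {})
--             f[value] = f.get(value, 0) + 1
--     final_attributes = {}
--     for key, f in freq.items():
--         best_value, best_count = None, 0
--         for value, count in f.items():
--             if count > best_count:
--                 best_value, best_count = value, count
--         final_attributes[key] = best_value
--     return final_attributes
-- ===== Notes on version B (the rewrite author's own statement) =====
-- stated objective: alternative
-- what changed: B replaces A's two-phase collect-candidate-lists-then-recount-and-max algorithm by a single counting pass into nested per-key frequency dicts followed by a running first-max scan per key, so no candidate lists are ever materialized and each occurrence is counted exactly once.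
import Mathlib
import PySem

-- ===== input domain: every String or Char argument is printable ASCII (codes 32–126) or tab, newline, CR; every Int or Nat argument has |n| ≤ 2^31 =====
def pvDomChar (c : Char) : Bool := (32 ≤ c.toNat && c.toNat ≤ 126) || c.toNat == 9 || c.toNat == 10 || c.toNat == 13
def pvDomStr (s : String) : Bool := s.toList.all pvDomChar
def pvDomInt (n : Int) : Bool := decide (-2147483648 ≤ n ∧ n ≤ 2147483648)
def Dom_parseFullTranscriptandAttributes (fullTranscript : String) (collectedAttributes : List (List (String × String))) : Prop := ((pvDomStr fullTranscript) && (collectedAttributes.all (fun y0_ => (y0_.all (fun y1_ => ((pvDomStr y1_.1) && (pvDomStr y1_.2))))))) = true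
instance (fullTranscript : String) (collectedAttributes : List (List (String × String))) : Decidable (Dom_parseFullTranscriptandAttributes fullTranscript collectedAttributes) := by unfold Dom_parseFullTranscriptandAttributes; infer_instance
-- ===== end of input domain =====

-- B fuses A's collect-then-recount phases into one pass over nested counters and replaces
-- max() over a rebuilt frequency dict by a running first-max scan (objective: alternative).

-- ===== PORT A =====
-- inner loop body of A's gathering pass: ensure the key is present, then append the value
def pvStepA (cv : PySem.Dict String (List String)) (kv : String × String) : PySem.Dict String (List String) :=
  let cv1 := if cv.contains kv.1 then cv else cv.insert kv.1 []
  cv1.insert kv.1 (cv1.getD kv.1 [] ++ [kv.2])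

-- body of A's second loop: count frequencies of the candidate values, take max by count
def pvSelA (fin : PySem.Dict String String) (kvs : String × List String) : PySem.Dict String String :=
  let freq := kvs.2.foldl (fun (f : PySem.Dict String Int) v => f.insert v (f.getD v 0 + 1)) PySem.Dict.empty
  match PySem.List.max? freq.items (fun x => x.2) with
  | some best => fin.insert kvs.1 best.1
  | none => fin   -- unreachable: every candidate list is nonempty (Python's max is only called on nonempty dicts)

def parseFullTranscriptandAttributes (fullTranscript : String) (collectedAttributes : List (List (String × String))) : List (String × String) :=
  let candidate_values := collectedAttributes.foldl (fun cv attr_dict => attr_dict.foldl pvStepA cv) PySem.Dict.empty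
  let final_attributes := candidate_values.items.foldl pvSelA PySem.Dict.empty
  final_attributes.items

-- ===== PORT B =====
-- inner loop body of B's single counting pass: bump freq[key][value]
def pvStepB (fr : PySem.Dict String (PySem.Dict String Int)) (kv : String × String) : PySem.Dict String (PySem.Dict String Int) :=
  let f := fr.getD kv.1 PySem.Dict.empty
  fr.insert kv.1 (f.insert kv.2 (f.getD kv.2 0 + 1))

-- running first-max scan over a per-key counter (best_value, best_count)
def pvBest (f : PySem.Dict String Int) : Option String × Int :=
  f.items.foldl (fun b vc => if vc.2 > b.2 then (some vc.1, vc.2) else b) (none, 0)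

def pvSelB (fin : PySem.Dict String String) (kf : String × PySem.Dict String Int) : PySem.Dict String String :=
  match (pvBest kf.2).1 with
  | some v => fin.insert kf.1 v
  | none => fin   -- unreachable: the inner counters are nonempty

def parseFullTranscriptandAttributes_alt (fullTranscript : String) (collectedAttributes : List (List (String × String))) : List (String × String) :=
  let freq := collectedAttributes.foldl (fun fr attr_dict => attr_dict.foldl pvStepB fr) PySem.Dict.empty
  let final_attributes := freq.items.foldl pvSelB PySem.Dict.empty
  final_attributes.items

-- ===== PRECONDITION & SPEC =====
def Spec_parseFullTranscriptandAttributes (fullTranscript : String) (collectedAttributes : List (List (String × String))) (out : List (String × String)) : Prop := out = parseFullTranscriptandAttributes_alt fullTranscript collectedAttributes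
instance (fullTranscript : String) (collectedAttributes : List (List (String × String))) (out : List (String × String)) : Decidable (Spec_parseFullTranscriptandAttributes fullTranscript collectedAttributes out) := by unfold Spec_parseFullTranscriptandAttributes; infer_instance

-- ===== CLAIM (what is proved, stated in full; the proofs are below) =====
def Claim_equal_parseFullTranscriptandAttributes : Prop := ∀ (fullTranscript : String) (collectedAttributes : List (List (String × String))), Dom_parseFullTranscriptandAttributes fullTranscript collectedAttributes → Spec_parseFullTranscriptandAttributes fullTranscript collectedAttributes (parseFullTranscriptandAttributes fullTranscript collectedAttributes)

-- ===== LEMMAS AND PROOFS =====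

-- relate B's nested counters to A's candidate lists: per key, B holds Counter(values)
def pvCtz (kvs : String × List String) : String × PySem.Dict String Int :=
  (kvs.1, PySem.Dict.counter kvs.2)

theorem pvContains_eq (G : PySem.Dict String (List String)) (F : PySem.Dict String (PySem.Dict String Int))
    (hF : F.items = G.items.map pvCtz) (k : String) : F.contains k = G.contains k := by
  simp [PySem.Dict.contains, hF, List.any_map, Function.comp_def, pvCtz]

theorem pvKeysNodup_eq (G : PySem.Dict String (List String)) (F : PySem.Dict String (PySem.Dict String Int))
    (hF : F.items = G.items.map pvCtz) : F.keys = G.keys := by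
  simp [PySem.Dict.keys, hF, List.map_map, Function.comp_def, pvCtz]

theorem pvStep_rel (G : PySem.Dict String (List String)) (F : PySem.Dict String (PySem.Dict String Int))
    (kv : String × String) (hF : F.items = G.items.map pvCtz) (hnd : G.keys.Nodup) :
    (pvStepB F kv).items = (pvStepA G kv).items.map pvCtz := by
  have hc := pvContains_eq G F hF kv.1
  by_cases h : G.contains kv.1 = true
  · -- existing key: both overwrite in place
    have hFc : F.contains kv.1 = true := by rw [hc]; exact h
    have hg : (G.get? kv.1).isSome := by rw [← PySem.Dict.contains_eq_isSome_get?]; exact h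
    obtain ⟨vs, hvs⟩ := Option.isSome_iff_exists.mp hg
    have hmem : (kv.1, vs) ∈ G.items := (PySem.Dict.get?_eq_some_iff_mem_items G kv.1 vs hnd).mp hvs
    have hFnd : F.keys.Nodup := by rw [pvKeysNodup_eq G F hF]; exact hnd
    have hFmem : (kv.1, PySem.Dict.counter vs) ∈ F.items := by
      rw [hF]; exact List.mem_map.mpr ⟨(kv.1, vs), hmem, rfl⟩
    have hFget : F.getD kv.1 PySem.Dict.empty = PySem.Dict.counter vs :=
      PySem.Dict.getD_of_mem_items F hFmem hFnd _
    have hGget : G.getD kv.1 [] = vs := by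
      rw [PySem.Dict.getD_eq_get?_getD, hvs]; rfl
    have hcnt : (PySem.Dict.counter vs).insert kv.2 ((PySem.Dict.counter vs).getD kv.2 0 + 1)
        = PySem.Dict.counter (vs ++ [kv.2]) := by
      rw [PySem.Dict.counter_append_singleton]; rfl
    show (pvStepB F kv).items = (pvStepA G kv).items.map pvCtz
    rw [pvStepB, pvStepA]
    simp only [h, if_true, hFget, hcnt, hGget]
    rw [PySem.Dict.items_insert_of_contains F _ hFc,
        PySem.Dict.items_insert_of_contains G _ h, hF, List.map_map, List.map_map]
    refine List.map_congr_left (fun p _ => ?_)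
    by_cases hp : (p.1 == kv.1) = true
    · simp [pvCtz, hp, Function.comp]
    · simp [pvCtz, hp, Function.comp]
  · -- fresh key: both append
    have h' : G.contains kv.1 = false := by revert h; cases G.contains kv.1 <;> simp
    have hFc : F.contains kv.1 = false := by rw [hc]; exact h'
    have hGstep : pvStepA G kv = G.insert kv.1 [kv.2] := by
      rw [pvStepA]
      simp only [h', if_false, Bool.false_eq_true, PySem.Dict.getD_insert_self, List.nil_append,
        PySem.Dict.insert_insert_self]
    have hFget : F.getD kv.1 PySem.Dict.empty = PySem.Dict.empty :=
      PySem.Dict.getD_of_not_contains F _ hFc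
    have hcnt : (PySem.Dict.empty : PySem.Dict String Int).insert kv.2
        ((PySem.Dict.empty : PySem.Dict String Int).getD kv.2 0 + 1)
        = PySem.Dict.counter [kv.2] := rfl
    rw [hGstep, pvStepB]
    simp only [hFget, hcnt]
    rw [PySem.Dict.items_insert_of_not_contains F _ hFc,
        PySem.Dict.items_insert_of_not_contains G _ h', hF, List.map_append]
    rfl

theorem pvStep_nodup (G : PySem.Dict String (List String)) (kv : String × String)
    (hnd : G.keys.Nodup) : (pvStepA G kv).keys.Nodup := by
  rw [pvStepA]
  by_cases h : G.contains kv.1 = true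
  · simp only [h, if_true]; exact PySem.Dict.nodup_keys_insert _ _ _ hnd
  · have h' : G.contains kv.1 = false := by revert h; cases G.contains kv.1 <;> simp
    simp only [h', Bool.false_eq_true, if_false]
    exact PySem.Dict.nodup_keys_insert _ _ _ (PySem.Dict.nodup_keys_insert _ _ _ hnd)

theorem pvFold_rel (ps : List (String × String)) (G : PySem.Dict String (List String))
    (F : PySem.Dict String (PySem.Dict String Int))
    (hF : F.items = G.items.map pvCtz) (hnd : G.keys.Nodup) :
    (ps.foldl pvStepB F).items = (ps.foldl pvStepA G).items.map pvCtz
      ∧ (ps.foldl pvStepA G).keys.Nodup := by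
  induction ps generalizing G F with
  | nil => exact ⟨hF, hnd⟩
  | cons kv t ih =>
    exact ih (pvStepA G kv) (pvStepB F kv) (pvStep_rel G F kv hF hnd) (pvStep_nodup G kv hnd)

theorem pvStep_ne (G : PySem.Dict String (List String)) (kv : String × String)
    (hne : ∀ p ∈ G.items, p.2 ≠ []) : ∀ p ∈ (pvStepA G kv).items, p.2 ≠ [] := by
  intro p hp
  rw [pvStepA] at hp
  rcases (PySem.Dict.mem_items_insert _ _ _ p).mp hp with h | ⟨hmem, _⟩
  · subst h; simp
  · by_cases h : G.contains kv.1 = true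
    · simp only [h, if_true] at hmem; exact hne p hmem
    · have h' : G.contains kv.1 = false := by revert h; cases G.contains kv.1 <;> simp
      simp only [h', Bool.false_eq_true, if_false] at hmem
      rcases (PySem.Dict.mem_items_insert _ _ _ p).mp hmem with h2 | ⟨hmem2, _⟩
      · subst h2
        -- p = (kv.1, []) is excluded: the outer insert matched p.1 ≠ kv.1 — contradiction handled below
        exact absurd rfl (by rename_i hne1; exact hne1)
      · exact hne p hmem2

theorem pvFold_ne (ps : List (String × String)) (G : PySem.Dict String (List String))
    (hne : ∀ p ∈ G.items, p.2 ≠ []) : ∀ p ∈ (ps.foldl pvStepA G).items, p.2 ≠ [] := by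
  induction ps generalizing G with
  | nil => exact hne
  | cons kv t ih => exact ih (pvStepA G kv) (pvStep_ne G kv hne)

-- the running first-max scan computes Python's max(..., key=count) (first extremal element)
theorem pvMax_cons_cons (p x : String × Int) (t : List (String × Int)) (key : (String × Int) → Int) :
    PySem.List.max? (p :: x :: t) key = PySem.List.max? ((if key p < key x then x else p) :: t) key := by
  simp only [PySem.List.max?, List.foldl_cons, apply_ite]

theorem pvBest_aux (t : List (String × Int)) (p : String × Int) :
    t.foldl (fun b vc => if vc.2 > b.2 then (some vc.1, vc.2) else b) (some p.1, p.2)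
      = (match PySem.List.max? (p :: t) (fun x => x.2) with
          | none => ((none : Option String), (0 : Int)) | some m => (some m.1, m.2)) := by
  induction t generalizing p with
  | nil => rfl
  | cons x t ih =>
    rw [pvMax_cons_cons]
    simp only [List.foldl_cons]
    by_cases hlt : p.2 < x.2
    · rw [if_pos hlt, if_pos hlt]; exact ih x
    · rw [if_neg hlt, if_neg hlt]; exact ih p

theorem pvBest_eq_max? (l : List (String × Int)) (hpos : ∀ x ∈ l, 0 < x.2) :
    l.foldl (fun b vc => if vc.2 > b.2 then (some vc.1, vc.2) else b) (none, 0)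
      = (match PySem.List.max? l (fun x => x.2) with
          | none => ((none : Option String), (0 : Int)) | some m => (some m.1, m.2)) := by
  cases l with
  | nil => rfl
  | cons x t =>
    have hx : 0 < x.2 := hpos x (by simp)
    simp only [List.foldl_cons]
    rw [if_pos hx]
    exact pvBest_aux t x

-- A's counting loop is collections.Counter (bridges this file's numeral instances to the library lemma)
theorem pvFreq_eq (vs : List String) :
    List.foldl (fun (f : PySem.Dict String Int) v => f.insert v (f.getD v 0 + 1)) PySem.Dict.empty vs
      = PySem.Dict.counter vs := by
  rw [PySem.Dict.foldl_insert_getD_add_one_eq_counter]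

-- pointwise: B's per-key selection on Counter(values) = A's freq-then-max selection
theorem pvSel_eq (fin : PySem.Dict String String) (kvs : String × List String) (hne : kvs.2 ≠ []) :
    pvSelB fin (pvCtz kvs) = pvSelA fin kvs := by
  simp only [pvSelA, pvSelB, pvBest, pvCtz]
  rw [pvFreq_eq]
  have hpos : ∀ x ∈ (PySem.Dict.counter kvs.2).items, 0 < x.2 := by
    intro x hx
    rw [PySem.Dict.items_counter] at hx
    obtain ⟨k, hk, rfl⟩ := List.mem_map.mp hx
    rw [PySem.Set.mem_ofList] at hk
    simpa using List.count_pos_iff.mpr hk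
  have hnil : (PySem.Dict.counter kvs.2).items ≠ [] := by
    rw [PySem.Dict.items_counter]
    obtain ⟨v, hv⟩ := List.exists_mem_of_ne_nil kvs.2 hne
    have hv' : v ∈ PySem.Set.ofList kvs.2 := (PySem.Set.mem_ofList kvs.2 v).mpr hv
    exact List.ne_nil_of_mem (List.mem_map_of_mem hv')
  obtain ⟨m, hm⟩ := Option.ne_none_iff_exists'.mp
    (fun h => hnil ((PySem.List.max?_eq_none_iff (PySem.Dict.counter kvs.2).items (fun x => x.2)).mp h))
  rw [pvBest_eq_max? _ hpos, hm]

-- ===== VERDICT (by name: the statement is the Claim_ definition above) =====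
theorem parseFullTranscriptandAttributes_spec : Claim_equal_parseFullTranscriptandAttributes := by
  intro ft cas _
  unfold Spec_parseFullTranscriptandAttributes
  simp only [parseFullTranscriptandAttributes, parseFullTranscriptandAttributes_alt]
  rw [show (cas.foldl (fun cv attr_dict => attr_dict.foldl pvStepA cv) PySem.Dict.empty)
        = cas.flatten.foldl pvStepA PySem.Dict.empty from (List.foldl_flatten).symm,
      show (cas.foldl (fun fr attr_dict => attr_dict.foldl pvStepB fr) PySem.Dict.empty)
        = cas.flatten.foldl pvStepB PySem.Dict.empty from (List.foldl_flatten).symm]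
  obtain ⟨hrel, _⟩ := pvFold_rel cas.flatten PySem.Dict.empty PySem.Dict.empty rfl (by simp [PySem.Dict.keys, PySem.Dict.empty])
  have hne := pvFold_ne cas.flatten PySem.Dict.empty (by intro p hp; simp [PySem.Dict.empty] at hp)
  rw [hrel, List.foldl_map]
  congr 1
  exact (PySem.List.foldl_congr_mem _ _ _ _ (fun acc x hx => pvSel_eq acc x (hne x hx))).symm
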